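-- pv_equiv track=rewrite | github.com/Whem/lotteryGuesser | src/LotteryGuesserDjango/lottery_handler/views.py | calculate_execution_time_distribution
-- ===== SOURCE A (Python) =====
-- def calculate_execution_time_distribution(algorithm_performances):
--     """
--     Végrehajtási idő eloszlás számítása
--     """
--     distribution = {'gyors': 0, 'közepes': 0, 'lassú': 0}
--
--     for perf in algorithm_performances:
--         exec_time = perf['average_execution_time']
--         if exec_time <= 100:  # 100ms alatt
--             distribution['gyors'] += 1
--         elif exec_time <= 1000:  # 1s alatt
--             distribution['közepes'] += 1
--         else:
--             distribution['lassú'] += 1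
--
--     return distribution
-- ===== SOURCE B (Python) =====
-- def calculate_execution_time_distribution(algorithm_performances):
--     times = [p['average_execution_time'] for p in algorithm_performances]
--     return {
--         'gyors': sum(1 for t in times if t <= 100),
--         'közepes': sum(1 for t in times if 100 < t <= 1000),
--         'lassú': sum(1 for t in times if t > 1000),
--     }
-- ===== Notes on version B (the rewrite author's own statement) =====
-- stated objective: simpler
-- what changed: Replaces the stateful branching loop that mutates a dict with one extraction pass plus three independent counting passes whose results build the dict literal directly.
import Mathlib
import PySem

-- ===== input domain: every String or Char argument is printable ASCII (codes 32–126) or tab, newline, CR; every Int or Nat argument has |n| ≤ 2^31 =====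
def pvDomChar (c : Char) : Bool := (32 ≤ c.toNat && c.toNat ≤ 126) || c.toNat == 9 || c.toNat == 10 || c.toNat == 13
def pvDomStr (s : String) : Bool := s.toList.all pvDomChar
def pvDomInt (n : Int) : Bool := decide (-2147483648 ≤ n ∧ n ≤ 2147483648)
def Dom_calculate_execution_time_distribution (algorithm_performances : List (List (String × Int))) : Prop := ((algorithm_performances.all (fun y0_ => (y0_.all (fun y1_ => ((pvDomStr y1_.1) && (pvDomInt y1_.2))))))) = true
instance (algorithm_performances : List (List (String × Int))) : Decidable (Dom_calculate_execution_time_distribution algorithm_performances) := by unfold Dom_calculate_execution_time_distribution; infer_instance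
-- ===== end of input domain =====

-- B replaces A's stateful branching loop over a mutated dict by one time-extraction pass
-- plus three independent counting passes (objective: simpler). Pre_ excludes inputs where
-- a performance record lacks the 'average_execution_time' key, on which A raises KeyError.


-- ===== PORT A =====
-- perf['average_execution_time']: first-match lookup in the association list; Pre_ guarantees
-- the key is present, so the `.getD 0` default is never taken on admitted inputs.
def pvTime (perf : List (String × Int)) : Int :=
  (perf.lookup "average_execution_time").getD 0

-- distribution[key] += 1 on the three-key dict: increment the value at the (unique) key in place.
def pvBump (dist : List (String × Int)) (key : String) : List (String × Int) :=
  dist.map (fun p => if p.1 = key then (p.1, p.2 + 1) else p)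

-- the body of A's for-loop, one iteration
def pvStep (dist : List (String × Int)) (perf : List (String × Int)) : List (String × Int) :=
  let exec_time := pvTime perf
  if exec_time ≤ 100 then pvBump dist "gyors"
  else if exec_time ≤ 1000 then pvBump dist "közepes"
  else pvBump dist "lassú"

def calculate_execution_time_distribution (algorithm_performances : List (List (String × Int))) : List (String × Int) :=
  algorithm_performances.foldl pvStep [("gyors", 0), ("közepes", 0), ("lassú", 0)]

-- ===== PORT B =====
def calculate_execution_time_distribution_alt (algorithm_performances : List (List (String × Int))) : List (String × Int) :=
  let times := algorithm_performances.map pvTime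
  [("gyors", (times.countP (fun t => t ≤ 100) : Int)),
   ("közepes", (times.countP (fun t => 100 < t && t ≤ 1000) : Int)),
   ("lassú", (times.countP (fun t => 1000 < t) : Int))]

-- ===== PRECONDITION & SPEC =====
-- Pre_ excludes exactly the inputs where some record lacks the key, on which Python A raises KeyError.
def Pre_calculate_execution_time_distribution (algorithm_performances : List (List (String × Int))) : Prop :=
  ∀ perf ∈ algorithm_performances, (perf.lookup "average_execution_time").isSome = true
instance (algorithm_performances : List (List (String × Int))) : Decidable (Pre_calculate_execution_time_distribution algorithm_performances) := by unfold Pre_calculate_execution_time_distribution; infer_instance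

def pvWitness_calculate_execution_time_distribution : (List (List (String × Int))) :=
  [[("average_execution_time", 50)], [("average_execution_time", 500)], [("average_execution_time", 5000)]]

def Spec_calculate_execution_time_distribution (algorithm_performances : List (List (String × Int))) (out : List (String × Int)) : Prop := out = calculate_execution_time_distribution_alt algorithm_performances
instance (algorithm_performances : List (List (String × Int))) (out : List (String × Int)) : Decidable (Spec_calculate_execution_time_distribution algorithm_performances out) := by unfold Spec_calculate_execution_time_distribution; infer_instance

-- ===== CLAIM (what is proved, stated in full; the proofs are below) =====
def Claim_equal_calculate_execution_time_distribution : Prop := ∀ (algorithm_performances : List (List (String × Int))), Dom_calculate_execution_time_distribution algorithm_performances → Pre_calculate_execution_time_distribution algorithm_performances → Spec_calculate_execution_time_distribution algorithm_performances (calculate_execution_time_distribution algorithm_performances)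

-- ===== LEMMAS AND PROOFS =====
lemma pvStep_le100 (dist perf : List (String × Int)) (h : pvTime perf ≤ 100) :
    pvStep dist perf = pvBump dist "gyors" := by simp [pvStep, h]

lemma pvStep_mid (dist perf : List (String × Int)) (h1 : ¬ pvTime perf ≤ 100) (h2 : pvTime perf ≤ 1000) :
    pvStep dist perf = pvBump dist "közepes" := by simp [pvStep, h1, h2]

lemma pvStep_gt (dist perf : List (String × Int)) (h1 : ¬ pvTime perf ≤ 100) (h2 : ¬ pvTime perf ≤ 1000) :
    pvStep dist perf = pvBump dist "lassú" := by simp [pvStep, h1, h2]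

lemma pvBump_gyors (g k l : Int) :
    pvBump [("gyors", g), ("közepes", k), ("lassú", l)] "gyors" =
      [("gyors", g + 1), ("közepes", k), ("lassú", l)] := by
  simp [pvBump]

lemma pvBump_kozepes (g k l : Int) :
    pvBump [("gyors", g), ("közepes", k), ("lassú", l)] "közepes" =
      [("gyors", g), ("közepes", k + 1), ("lassú", l)] := by
  simp [pvBump]

lemma pvBump_lassu (g k l : Int) :
    pvBump [("gyors", g), ("közepes", k), ("lassú", l)] "lassú" =
      [("gyors", g), ("közepes", k), ("lassú", l + 1)] := by
  simp [pvBump]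

lemma fold_characterization (aps : List (List (String × Int))) : ∀ (g k l : Int),
    aps.foldl pvStep [("gyors", g), ("közepes", k), ("lassú", l)] =
    [("gyors", g + ((aps.map pvTime).countP (fun t => t ≤ 100) : Int)),
     ("közepes", k + ((aps.map pvTime).countP (fun t => 100 < t && t ≤ 1000) : Int)),
     ("lassú", l + ((aps.map pvTime).countP (fun t => 1000 < t) : Int))] := by
  induction aps with
  | nil => intro g k l; simp
  | cons p rest ih =>
    intro g k l
    rw [List.foldl_cons]
    by_cases h1 : pvTime p ≤ 100
    · rw [pvStep_le100 _ _ h1, pvBump_gyors, ih]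
      simp only [List.map_cons, List.countP_cons]
      have hg : (decide (pvTime p ≤ 100)) = true := by simpa using h1
      have hk : (decide (100 < pvTime p) && decide (pvTime p ≤ 1000)) = false := by
        simp only [Bool.and_eq_false_iff, decide_eq_false_iff_not]; left; omega
      have hl : (decide (1000 < pvTime p)) = false := by
        simp only [decide_eq_false_iff_not]; omega
      simp only [hg, hk, hl, if_true]
      simp only [List.cons.injEq, Prod.mk.injEq, and_true, true_and]
      refine ⟨by push_cast; ring, by push_cast; ring, by push_cast; ring⟩
    · by_cases h2 : pvTime p ≤ 1000
      · rw [pvStep_mid _ _ h1 h2, pvBump_kozepes, ih]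
        simp only [List.map_cons, List.countP_cons]
        have hg : (decide (pvTime p ≤ 100)) = false := by simpa using h1
        have hk : (decide (100 < pvTime p) && decide (pvTime p ≤ 1000)) = true := by
          simp only [Bool.and_eq_true, decide_eq_true_eq]; exact ⟨by omega, h2⟩
        have hl : (decide (1000 < pvTime p)) = false := by
          simp only [decide_eq_false_iff_not]; omega
        simp only [hg, hk, hl, if_true]
        simp only [List.cons.injEq, Prod.mk.injEq, and_true, true_and]
        refine ⟨by push_cast; ring, by push_cast; ring, by push_cast; ring⟩
      · rw [pvStep_gt _ _ h1 h2, pvBump_lassu, ih]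
        simp only [List.map_cons, List.countP_cons]
        have hg : (decide (pvTime p ≤ 100)) = false := by simpa using h1
        have hk : (decide (100 < pvTime p) && decide (pvTime p ≤ 1000)) = false := by
          simp only [Bool.and_eq_false_iff, decide_eq_false_iff_not]; right; exact h2
        have hl : (decide (1000 < pvTime p)) = true := by
          simp only [decide_eq_true_eq]; omega
        simp only [hg, hk, hl, if_true]
        simp only [List.cons.injEq, Prod.mk.injEq, and_true, true_and]
        refine ⟨by push_cast; ring, by push_cast; ring, by push_cast; ring⟩

-- ===== VERDICT (by name: the statement is the Claim_ definition above) =====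
theorem calculate_execution_time_distribution_spec : Claim_equal_calculate_execution_time_distribution := by
  intro aps _ _
  unfold Spec_calculate_execution_time_distribution
  unfold calculate_execution_time_distribution calculate_execution_time_distribution_alt
  rw [fold_characterization aps 0 0 0]
  simp
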